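-- pv_equiv track=rewrite | github.com/google-research/google-research | warmstart_graphcut_image_segmentation/warmstart.py | BuildRdGraph
-- ===== SOURCE A (Python) =====
-- from copy import deepcopy
--
-- def BuildRdGraph(flows, graph):
--   rGraph = deepcopy(graph)
--   for i in graph:
--     for j in graph[i]:
--       assert flows[i][j] <= graph[i][j]
--       rGraph[i][j] -= flows[i][j]
--       rGraph[j][i] += flows[i][j]
--   return rGraph
-- ===== SOURCE B (Python) =====
-- def BuildRdGraph(flows, graph):
--   # Stage 1: single pass over flows, accumulating a flat edge-keyed delta table.
--   delta = {}
--   for i, row in flows.items():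
--     for j, f in row.items():
--       delta[(i, j)] = delta.get((i, j), 0) - f
--       delta[(j, i)] = delta.get((j, i), 0) + f
--   # Stage 2: pass over graph emitting capacity plus the accumulated delta.
--   out = {}
--   for i, row in graph.items():
--     new = {}
--     for j, cap in row.items():
--       assert flows[i][j] <= cap
--       new[j] = cap + delta.get((i, j), 0)
--     out[i] = new
--   return out
-- ===== Notes on version B (the rewrite author's own statement) =====
-- stated objective: alternative
-- what changed: A deepcopies graph and cross-accumulates each edge's flow in place over the copy; B instead runs two staged passes: a single pass over flows builds a flat edge-keyed delta table (delta[(i,j)] collects -flows[i][j] and +flows[j][i]), then a pass over graph emits cap + delta[(i,j)] into a fresh nested dict, mutating nothing.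
import Mathlib
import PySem

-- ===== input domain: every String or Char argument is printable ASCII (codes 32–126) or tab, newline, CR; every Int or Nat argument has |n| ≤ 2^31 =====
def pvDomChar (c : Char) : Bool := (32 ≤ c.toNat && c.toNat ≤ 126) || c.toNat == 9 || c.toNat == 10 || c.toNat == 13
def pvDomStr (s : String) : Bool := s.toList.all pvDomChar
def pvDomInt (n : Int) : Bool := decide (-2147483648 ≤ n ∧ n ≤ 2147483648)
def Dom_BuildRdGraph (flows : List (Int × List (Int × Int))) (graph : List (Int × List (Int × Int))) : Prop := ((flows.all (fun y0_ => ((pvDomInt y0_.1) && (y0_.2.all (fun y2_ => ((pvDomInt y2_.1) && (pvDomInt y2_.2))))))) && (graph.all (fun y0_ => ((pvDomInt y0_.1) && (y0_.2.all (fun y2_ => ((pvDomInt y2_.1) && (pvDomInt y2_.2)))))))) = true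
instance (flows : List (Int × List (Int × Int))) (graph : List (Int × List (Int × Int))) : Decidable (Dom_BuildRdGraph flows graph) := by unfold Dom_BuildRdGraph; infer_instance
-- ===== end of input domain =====

-- B replaces A's deepcopy-then-cross-accumulate over graph by two staged passes: one pass over
-- flows accumulating a flat edge-keyed delta table, then a pass over graph emitting cap + delta.
-- Same cost; neither input is mutated by either version.

-- assoc-list dict lookup with default: d.get(k, dflt); exact for dicts (unique keys, which Pre_ requires)
def dGet {α : Type} (d : List (Int × α)) (k : Int) (dflt : α) : α :=
  match d with
  | [] => dflt
  | (k', v) :: rest => if k' = k then v else dGet rest k dflt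

-- in-place value update d[k] = f(d[k]) on the first matching key; no-op when k is absent
-- (Python raises KeyError there; Pre_ excludes those inputs)
def dMod {α : Type} (d : List (Int × α)) (k : Int) (f : α → α) : List (Int × α) :=
  match d with
  | [] => []
  | (k', v) :: rest => if k' = k then (k', f v) :: rest else (k', v) :: dMod rest k f

-- ===== PORT A =====
def BuildRdGraph (flows : List (Int × List (Int × Int))) (graph : List (Int × List (Int × Int))) : List (Int × List (Int × Int)) :=
  -- rGraph = deepcopy(graph); for i in graph: for j in graph[i]: rGraph[i][j] -= flows[i][j]; rGraph[j][i] += flows[i][j]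
  -- (the assert can only fail outside Pre_)
  (graph.map Prod.fst).foldl (fun rG i =>
    ((dGet graph i []).map Prod.fst).foldl (fun rG j =>
      let fij := dGet (dGet flows i []) j 0
      dMod (dMod rG i (fun row => dMod row j (fun c => c - fij)))
           j (fun row => dMod row i (fun c => c + fij))) rG) graph

-- ===== PORT B =====
-- tuple-keyed dict lookup: delta.get((i,j), dflt)
def dGetP (d : List ((Int × Int) × Int)) (k : Int × Int) (dflt : Int) : Int :=
  match d with
  | [] => dflt
  | (k', v) :: rest => if k' = k then v else dGetP rest k dflt

-- tuple-keyed dict assignment delta[k] = v: overwrite first occurrence in place, else append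
def dSetP (d : List ((Int × Int) × Int)) (k : Int × Int) (v : Int) : List ((Int × Int) × Int) :=
  match d with
  | [] => [(k, v)]
  | (k', v') :: rest => if k' = k then (k', v) :: rest else (k', v') :: dSetP rest k v

-- Stage 1 of B: for i,row in flows: for j,f in row: delta[(i,j)] -= f; delta[(j,i)] += f
def deltaOf (flows : List (Int × List (Int × Int))) : List ((Int × Int) × Int) :=
  flows.foldl (fun d p =>
    p.2.foldl (fun d q =>
      let d1 := dSetP d (p.1, q.1) (dGetP d (p.1, q.1) 0 - q.2)
      dSetP d1 (q.1, p.1) (dGetP d1 (q.1, p.1) 0 + q.2)) d) []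

-- Stage 2: out[i][j] = graph[i][j] + delta.get((i,j), 0)  (the assert can only fail outside Pre_)
def BuildRdGraph_alt (flows : List (Int × List (Int × Int))) (graph : List (Int × List (Int × Int))) : List (Int × List (Int × Int)) :=
  let delta := deltaOf flows
  graph.map (fun p => (p.1, p.2.map (fun q => (q.1, q.2 + dGetP delta (p.1, q.1) 0))))

-- ===== PRECONDITION & SPEC =====
-- Pre_ excludes (a) inputs where A raises: asymmetric graph structure (KeyError at rGraph[j][i]),
-- a missing flows[i][j] (KeyError), or flows[i][j] > graph[i][j] (AssertionError); and (b) assoc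
-- lists with duplicate keys, which do not represent a Python dict at all.
def Pre_BuildRdGraph (flows : List (Int × List (Int × Int))) (graph : List (Int × List (Int × Int))) : Prop :=
  (graph.map Prod.fst).Nodup ∧
  (∀ p ∈ graph, (p.2.map Prod.fst).Nodup) ∧
  (flows.map Prod.fst).Nodup ∧
  (∀ p ∈ flows, (p.2.map Prod.fst).Nodup) ∧
  (∀ p ∈ graph, ∀ q ∈ p.2,
      (∃ p' ∈ graph, p'.1 = q.1 ∧ p.1 ∈ p'.2.map Prod.fst) ∧
      (∃ f ∈ flows, f.1 = p.1 ∧ ∃ r ∈ f.2, r.1 = q.1 ∧ r.2 ≤ q.2))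
instance (flows : List (Int × List (Int × Int))) (graph : List (Int × List (Int × Int))) : Decidable (Pre_BuildRdGraph flows graph) := by unfold Pre_BuildRdGraph; infer_instance

def pvWitness_BuildRdGraph : (List (Int × List (Int × Int))) × (List (Int × List (Int × Int))) :=
  ([(0, [(1, 1)]), (1, [(0, 0)])], [(0, [(1, 2)]), (1, [(0, 3)])])

def Spec_BuildRdGraph (flows : List (Int × List (Int × Int))) (graph : List (Int × List (Int × Int))) (out : List (Int × List (Int × Int))) : Prop := out = BuildRdGraph_alt flows graph
instance (flows : List (Int × List (Int × Int))) (graph : List (Int × List (Int × Int))) (out : List (Int × List (Int × Int))) : Decidable (Spec_BuildRdGraph flows graph out) := by unfold Spec_BuildRdGraph; infer_instance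

-- ===== CLAIM (what is proved, stated in full; the proofs are below) =====
def Claim_equal_BuildRdGraph : Prop := ∀ (flows : List (Int × List (Int × Int))) (graph : List (Int × List (Int × Int))), Dom_BuildRdGraph flows graph → Pre_BuildRdGraph flows graph → Spec_BuildRdGraph flows graph (BuildRdGraph flows graph)

-- ===== LEMMAS AND PROOFS =====

-- the value flows[a][b] (0 outside Pre_'s guarantees)
def fv (flows : List (Int × List (Int × Int))) (a b : Int) : Int := dGet (dGet flows a []) b 0

-- graph's structure filled with values v i j
def shape (g : List (Int × List (Int × Int))) (v : Int → Int → Int) : List (Int × List (Int × Int)) :=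
  g.map (fun p => (p.1, p.2.map (fun q => (q.1, v p.1 q.1))))

-- effect on the value function of processing one edge (a,b) of either version's accumulation
def updV (flows : List (Int × List (Int × Int))) (v : Int → Int → Int) (a b : Int) : Int → Int → Int :=
  fun i j =>
    (fun x => if i = b ∧ j = a then x + fv flows a b else x)
      (if i = a ∧ j = b then v i j - fv flows a b else v i j)

def applyAll (flows : List (Int × List (Int × Int))) (v : Int → Int → Int) : List (Int × Int) → (Int → Int → Int)
  | [] => v
  | (a, b) :: Q => applyAll flows (updV flows v a b) Q

-- A's loop body as a function of one edge
def stepE (flows : List (Int × List (Int × Int))) (rG : List (Int × List (Int × Int))) (e : Int × Int) : List (Int × List (Int × Int)) :=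
  dMod (dMod rG e.1 (fun row => dMod row e.2 (fun c => c - fv flows e.1 e.2)))
       e.2 (fun row => dMod row e.1 (fun c => c + fv flows e.1 e.2))

-- B's stage-1 loop body as a function of one (edge, flow) item
def stepD (d : List ((Int × Int) × Int)) (it : (Int × Int) × Int) : List ((Int × Int) × Int) :=
  let d1 := dSetP d it.1 (dGetP d it.1 0 - it.2)
  dSetP d1 (it.1.2, it.1.1) (dGetP d1 (it.1.2, it.1.1) 0 + it.2)

-- the edge list either accumulation processes
def edges (g : List (Int × List (Int × Int))) : List (Int × Int) :=
  g.flatMap (fun p => p.2.map (fun q => (p.1, q.1)))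

-- stage-1 items of B: ((i,j), flows[i][j]) in iteration order
def itemsOf (flows : List (Int × List (Int × Int))) : List ((Int × Int) × Int) :=
  flows.flatMap (fun p => p.2.map (fun q => ((p.1, q.1), q.2)))

theorem dGet_of_mem {α : Type} (d : List (Int × α)) (dflt : α) (hnd : (d.map Prod.fst).Nodup)
    (p : Int × α) (hp : p ∈ d) : dGet d p.1 dflt = p.2 := by
  induction d with
  | nil => cases hp
  | cons a rest ih =>
    simp only [List.map_cons, List.nodup_cons] at hnd
    rcases List.mem_cons.1 hp with h | h
    · subst h; simp [dGet]
    · have : a.1 ≠ p.1 := fun he => hnd.1 (he ▸ List.mem_map_of_mem h)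
      simpa [dGet, this] using ih hnd.2 h

theorem map_if_of_not_mem {α β : Type} (l : List (Int × β)) (k : Int) (R : Int × β → α) (F : α → α)
    (h : k ∉ l.map Prod.fst) :
    l.map (fun p => (p.1, if p.1 = k then F (R p) else R p)) = l.map (fun p => (p.1, R p)) := by
  apply List.map_congr_left
  intro p hp
  have : p.1 ≠ k := fun he => h (he ▸ List.mem_map_of_mem hp)
  simp [this]

theorem dMod_map {α β : Type} (l : List (Int × β)) (R : Int × β → α) (k : Int) (F : α → α)
    (hnd : (l.map Prod.fst).Nodup) :
    dMod (l.map (fun p => (p.1, R p))) k F = l.map (fun p => (p.1, if p.1 = k then F (R p) else R p)) := by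
  induction l with
  | nil => rfl
  | cons a rest ih =>
    simp only [List.map_cons, List.nodup_cons] at hnd ⊢
    by_cases h : a.1 = k
    · subst h
      simp [dMod, (map_if_of_not_mem rest a.1 R F hnd.1).symm]
    · simp [dMod, h, ih hnd.2]

theorem dMod2_shape (g : List (Int × List (Int × Int))) (v : Int → Int → Int) (i0 j0 : Int) (h : Int → Int)
    (hnd : (g.map Prod.fst).Nodup) (hin : ∀ p ∈ g, (p.2.map Prod.fst).Nodup) :
    dMod (shape g v) i0 (fun row => dMod row j0 h) =
      shape g (fun i j => if i = i0 ∧ j = j0 then h (v i j) else v i j) := by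
  unfold shape
  rw [dMod_map g _ i0 _ hnd]
  apply List.map_congr_left
  rintro ⟨pk, pv⟩ hp
  have hnin : (pv.map Prod.fst).Nodup := hin _ hp
  by_cases hi : pk = i0
  · subst hi
    simp only
    rw [dMod_map pv (fun q => v pk q.1) j0 h hnin]
    simp
  · simp [hi]

theorem stepE_shape (flows g : List (Int × List (Int × Int))) (v : Int → Int → Int) (a b : Int)
    (hnd : (g.map Prod.fst).Nodup) (hin : ∀ p ∈ g, (p.2.map Prod.fst).Nodup) :
    stepE flows (shape g v) (a, b) = shape g (updV flows v a b) := by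
  unfold stepE
  simp only
  rw [dMod2_shape g v a b _ hnd hin, dMod2_shape g _ b a _ hnd hin]
  rfl

theorem foldl_stepE_shape (flows g : List (Int × List (Int × Int))) (Q : List (Int × Int)) (v : Int → Int → Int)
    (hnd : (g.map Prod.fst).Nodup) (hin : ∀ p ∈ g, (p.2.map Prod.fst).Nodup) :
    Q.foldl (stepE flows) (shape g v) = shape g (applyAll flows v Q) := by
  induction Q generalizing v with
  | nil => rfl
  | cons e Q ih =>
    obtain ⟨a, b⟩ := e
    rw [List.foldl_cons, stepE_shape flows g v a b hnd hin, ih]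
    rfl

theorem applyAll_val (flows : List (Int × List (Int × Int))) (Q : List (Int × Int)) (v : Int → Int → Int)
    (i j : Int) (hQ : Q.Nodup) :
    applyAll flows v Q i j =
      v i j - (if (i, j) ∈ Q then fv flows i j else 0) + (if (j, i) ∈ Q then fv flows j i else 0) := by
  induction Q generalizing v with
  | nil => simp [applyAll]
  | cons e Q ih =>
    obtain ⟨a, b⟩ := e
    rw [List.nodup_cons] at hQ
    rw [applyAll, ih _ hQ.2]
    have hmem1 : ((i, j) ∈ (a, b) :: Q) ↔ ((i = a ∧ j = b) ∨ (i, j) ∈ Q) := by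
      simp [Prod.ext_iff]
    have hmem2 : ((j, i) ∈ (a, b) :: Q) ↔ ((j = a ∧ i = b) ∨ (j, i) ∈ Q) := by
      simp [Prod.ext_iff]
    simp only [hmem1, hmem2]
    unfold updV
    by_cases hA : i = a ∧ j = b
    · obtain ⟨rfl, rfl⟩ := hA
      have hm1 : (i, j) ∉ Q := hQ.1
      by_cases hij : i = j
      · subst hij
        simp [hm1]
      · have hB : ¬ (i = j ∧ j = i) := fun hc => hij hc.1
        have hB' : ¬ (j = i ∧ i = j) := fun hc => hij hc.2
        by_cases m2 : (j, i) ∈ Q <;> simp [hm1, hB, hB', m2]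
    · by_cases hB : i = b ∧ j = a
      · obtain ⟨rfl, rfl⟩ := hB
        have hm2 : (j, i) ∉ Q := hQ.1
        by_cases m1 : (i, j) ∈ Q
        · simp [hA, hm2, m1]
          ring
        · simp [hA, hm2, m1]
      · have hB' : ¬ (j = a ∧ i = b) := fun hc => hB ⟨hc.2, hc.1⟩
        simp [hA, hB, hB']

theorem nodup_edges (g : List (Int × List (Int × Int)))
    (hnd : (g.map Prod.fst).Nodup) (hin : ∀ p ∈ g, (p.2.map Prod.fst).Nodup) :
    (edges g).Nodup := by
  induction g with
  | nil => simp [edges]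
  | cons p g' ih =>
    simp only [List.map_cons, List.nodup_cons] at hnd
    rw [edges, List.flatMap_cons]
    apply List.Nodup.append
    · have h2 := hin p (List.mem_cons_self)
      have he : p.2.map (fun q => (p.1, q.1)) = (p.2.map Prod.fst).map (fun j => (p.1, j)) := by
        simp [List.map_map, Function.comp_def]
      rw [he]
      exact h2.map (fun x y hxy => (Prod.ext_iff.1 hxy).2)
    · exact ih hnd.2 (fun q hq => hin q (List.mem_cons_of_mem _ hq))
    · intro e he1 he2
      have h1 : e.1 = p.1 := by
        obtain ⟨q, _, rfl⟩ := List.mem_map.1 he1; rfl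
      obtain ⟨p', hp', he⟩ := List.mem_flatMap.1 he2
      obtain ⟨q', hq', rfl⟩ := List.mem_map.1 he
      exact hnd.1 (h1 ▸ List.mem_map_of_mem hp')

theorem foldl_flatMap' {α β γ : Type} (l : List α) (h : α → List β) (f : γ → β → γ) (init : γ) :
    (l.flatMap h).foldl f init = l.foldl (fun acc p => (h p).foldl f acc) init := by
  induction l generalizing init with
  | nil => rfl
  | cons a l ih => simp [List.flatMap_cons, List.foldl_append, ih]

theorem foldl_congr_mem' {α γ : Type} (l : List α) (f g : γ → α → γ) (init : γ)
    (h : ∀ acc, ∀ x ∈ l, f acc x = g acc x) : l.foldl f init = l.foldl g init := by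
  induction l generalizing init with
  | nil => rfl
  | cons a l ih =>
    rw [List.foldl_cons, List.foldl_cons, h init a List.mem_cons_self]
    exact ih _ (fun acc x hx => h acc x (List.mem_cons_of_mem _ hx))

theorem A_eq_foldl_edges (flows g : List (Int × List (Int × Int)))
    (hnd : (g.map Prod.fst).Nodup) :
    BuildRdGraph flows g = (edges g).foldl (stepE flows) g := by
  unfold BuildRdGraph edges
  rw [foldl_flatMap', List.foldl_map]
  apply foldl_congr_mem'
  intro acc p hp
  rw [dGet_of_mem g [] hnd p hp, List.foldl_map, List.foldl_map]
  rfl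

theorem shape_congr (g : List (Int × List (Int × Int))) (v w : Int → Int → Int)
    (h : ∀ p ∈ g, ∀ q ∈ p.2, v p.1 q.1 = w p.1 q.1) : shape g v = shape g w := by
  unfold shape
  exact List.map_congr_left fun p hp =>
    congrArg _ (List.map_congr_left fun q hq => by rw [h p hp q hq])

theorem shape_gv (g : List (Int × List (Int × Int)))
    (hnd : (g.map Prod.fst).Nodup) (hin : ∀ p ∈ g, (p.2.map Prod.fst).Nodup) :
    shape g (fun i j => dGet (dGet g i []) j 0) = g := by
  unfold shape
  conv_rhs => rw [← List.map_id g]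
  apply List.map_congr_left
  intro p hp
  beta_reduce
  rw [dGet_of_mem g [] hnd p hp]
  have : p.2.map (fun q => (q.1, dGet p.2 q.1 0)) = p.2 := by
    conv_rhs => rw [← List.map_id p.2]
    exact List.map_congr_left fun q hq => by rw [dGet_of_mem p.2 0 (hin p hp) q hq]; simp
  simp [this]

theorem mem_edges (g : List (Int × List (Int × Int))) (p : Int × List (Int × Int)) (q : Int × Int)
    (hp : p ∈ g) (hq : q ∈ p.2) : (p.1, q.1) ∈ edges g := by
  unfold edges
  exact List.mem_flatMap.2 ⟨p, hp, List.mem_map_of_mem hq⟩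

-- ===== B-side lemmas =====

theorem dGetP_dSetP (d : List ((Int × Int) × Int)) (k k' : Int × Int) (v dflt : Int) :
    dGetP (dSetP d k v) k' dflt = if k' = k then v else dGetP d k' dflt := by
  induction d with
  | nil =>
    by_cases h : k' = k
    · subst h; simp [dSetP, dGetP]
    · simp [dSetP, dGetP, h]
      intro e; exact absurd e.symm h
  | cons a rest ih =>
    by_cases h : a.1 = k
    · subst h
      by_cases h2 : a.1 = k'
      · subst h2; simp [dSetP, dGetP]
      · simp [dSetP, dGetP, h2]
        intro e; exact absurd e.symm h2
    · by_cases h2 : a.1 = k'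
      · subst h2; simp [dSetP, dGetP, h]
      · simp [dSetP, dGetP, h, h2, ih]

theorem items_map_fst (flows : List (Int × List (Int × Int))) :
    (itemsOf flows).map Prod.fst = edges flows := by
  simp [itemsOf, edges, List.map_flatMap, List.map_map, Function.comp_def]

theorem deltaOf_eq_items (flows : List (Int × List (Int × Int))) :
    deltaOf flows = (itemsOf flows).foldl stepD [] := by
  unfold deltaOf itemsOf
  rw [foldl_flatMap']
  apply foldl_congr_mem'
  intro acc p _
  rw [List.foldl_map]
  rfl

theorem stepD_val (flows : List (Int × List (Int × Int))) (d : List ((Int × Int) × Int))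
    (i j f : Int) (hf : f = fv flows i j) :
    (fun a b => dGetP (stepD d ((i, j), f)) (a, b) 0) =
      updV flows (fun a b => dGetP d (a, b) 0) i j := by
  funext a b
  subst hf
  simp only [stepD, updV, dGetP_dSetP, Prod.mk.injEq]
  by_cases h1 : a = j ∧ b = i
  · obtain ⟨rfl, rfl⟩ := h1
    by_cases h2 : a = b ∧ b = a
    · obtain ⟨rfl, -⟩ := h2; simp
    · simp [h2]
  · by_cases h2 : a = i ∧ b = j
    · obtain ⟨rfl, rfl⟩ := h2; simp [h1]
    · simp [h1, h2]

theorem foldl_stepD_val (flows : List (Int × List (Int × Int))) (Q : List ((Int × Int) × Int))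
    (d : List ((Int × Int) × Int)) (hQ : ∀ it ∈ Q, it.2 = fv flows it.1.1 it.1.2) :
    (fun a b => dGetP (Q.foldl stepD d) (a, b) 0) =
      applyAll flows (fun a b => dGetP d (a, b) 0) (Q.map Prod.fst) := by
  induction Q generalizing d with
  | nil => rfl
  | cons it Q ih =>
    obtain ⟨⟨i, j⟩, f⟩ := it
    have hf : f = fv flows i j := hQ _ List.mem_cons_self
    rw [List.foldl_cons, List.map_cons,
        ih (stepD d ((i, j), f)) (fun x hx => hQ x (List.mem_cons_of_mem _ hx)),
        stepD_val flows d i j f hf]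
    rfl

theorem delta_val (flows : List (Int × List (Int × Int)))
    (hnd : (flows.map Prod.fst).Nodup) (hin : ∀ p ∈ flows, (p.2.map Prod.fst).Nodup)
    (a b : Int) :
    dGetP (deltaOf flows) (a, b) 0 =
      0 - (if (a, b) ∈ edges flows then fv flows a b else 0)
        + (if (b, a) ∈ edges flows then fv flows b a else 0) := by
  have hQ : ∀ it ∈ itemsOf flows, it.2 = fv flows it.1.1 it.1.2 := by
    intro it hit
    obtain ⟨p, hp, hm⟩ := List.mem_flatMap.1 hit
    obtain ⟨q, hq, rfl⟩ := List.mem_map.1 hm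
    simp only [fv]
    rw [dGet_of_mem flows [] hnd p hp, dGet_of_mem p.2 0 (hin p hp) q hq]
  have h := congrFun (congrFun (foldl_stepD_val flows (itemsOf flows) [] hQ) a) b
  rw [deltaOf_eq_items, h, items_map_fst,
      applyAll_val flows (edges flows) _ a b (nodup_edges flows hnd hin)]
  rfl

theorem alt_eq_shape (flows g : List (Int × List (Int × Int)))
    (hnd : (g.map Prod.fst).Nodup) (hin : ∀ p ∈ g, (p.2.map Prod.fst).Nodup) :
    BuildRdGraph_alt flows g =
      shape g (fun i j => dGet (dGet g i []) j 0 + dGetP (deltaOf flows) (i, j) 0) := by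
  unfold BuildRdGraph_alt shape
  apply List.map_congr_left
  intro p hp
  refine congrArg _ (List.map_congr_left fun q hq => ?_)
  beta_reduce
  rw [dGet_of_mem g [] hnd p hp, dGet_of_mem p.2 0 (hin p hp) q hq]

theorem BuildRdGraph_spec : Claim_equal_BuildRdGraph := by
  intro flows graph _ hpre
  obtain ⟨hnd, hin, hfnd, hfin, hsym⟩ := hpre
  unfold Spec_BuildRdGraph
  rw [A_eq_foldl_edges flows graph hnd]
  have h0 := foldl_stepE_shape flows graph (edges graph)
    (fun i j => dGet (dGet graph i []) j 0) hnd hin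
  rw [shape_gv graph hnd hin] at h0
  rw [h0, alt_eq_shape flows graph hnd hin]
  apply shape_congr
  intro p hp q hq
  have hm1 : (p.1, q.1) ∈ edges graph := mem_edges graph p q hp hq
  obtain ⟨⟨p', hp', hpe, hmem⟩, ⟨fr, hfr, hfe, r, hr, hre, -⟩⟩ := hsym p hp q hq
  have hm2 : (q.1, p.1) ∈ edges graph := by
    obtain ⟨q', hq', hqe⟩ := List.mem_map.1 hmem
    have := mem_edges graph p' q' hp' hq'
    rwa [hqe, hpe] at this
  -- flows-side memberships for the delta
  have hf1 : (p.1, q.1) ∈ edges flows := by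
    have := mem_edges flows fr r hfr hr
    rwa [hfe, hre] at this
  obtain ⟨q', hq', hqe⟩ := List.mem_map.1 hmem
  obtain ⟨-, fr2, hfr2, hfe2, r2, hr2, hre2, -⟩ := hsym p' hp' q' hq'
  have hf2 : (q.1, p.1) ∈ edges flows := by
    have := mem_edges flows fr2 r2 hfr2 hr2
    rwa [hfe2, hre2, hpe, hqe] at this
  rw [applyAll_val flows (edges graph) _ p.1 q.1 (nodup_edges graph hnd hin),
      if_pos hm1, if_pos hm2,
      delta_val flows hfnd hfin p.1 q.1, if_pos hf1, if_pos hf2]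
  ring
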